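-- pv_equiv track=rewrite | github.com/xinziXu/CardioLikeNet | ARR_CLF/utils.py | turning_point
-- ===== SOURCE A (Python) =====
-- def turning_point(ecg):
--     turning_points = []
--     turning_points_dir = []
--     for i in range(1, len(ecg)-1):
--         if (ecg[i] > ecg[i-1]) and (ecg[i] > ecg[i+1]):
--             turning_points.append(i)
--             turning_points_dir.append(1)
--         elif (ecg[i] < ecg[i-1]) and (ecg[i] < ecg[i+1]):
--             turning_points.append(i)
--             turning_points_dir.append(-1)
--     return turning_points_dir, turning_points
-- ===== SOURCE B (Python) =====
-- def turning_point(ecg):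
--     # Two-phase: materialize a trend table over adjacent pairs, then scan pairs of trends.
--     trend = []
--     for j in range(len(ecg) - 1):
--         if ecg[j + 1] > ecg[j]:
--             trend.append(1)
--         elif ecg[j + 1] < ecg[j]:
--             trend.append(-1)
--         else:
--             trend.append(0)
--     dirs = []
--     points = []
--     for i in range(1, len(ecg) - 1):
--         if trend[i - 1] == 1 and trend[i] == -1:
--             dirs.append(1)
--             points.append(i)
--         elif trend[i - 1] == -1 and trend[i] == 1:
--             dirs.append(-1)
--             points.append(i)
--     return dirs, points
-- ===== Notes on version B (the rewrite author's own statement) =====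
-- stated objective: alternative
-- what changed: B first materializes a trend table of adjacent-pair comparison signs and then detects turning points by scanning consecutive trend entries, instead of A's single pass comparing each sample to both neighbours inline.
import Mathlib
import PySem

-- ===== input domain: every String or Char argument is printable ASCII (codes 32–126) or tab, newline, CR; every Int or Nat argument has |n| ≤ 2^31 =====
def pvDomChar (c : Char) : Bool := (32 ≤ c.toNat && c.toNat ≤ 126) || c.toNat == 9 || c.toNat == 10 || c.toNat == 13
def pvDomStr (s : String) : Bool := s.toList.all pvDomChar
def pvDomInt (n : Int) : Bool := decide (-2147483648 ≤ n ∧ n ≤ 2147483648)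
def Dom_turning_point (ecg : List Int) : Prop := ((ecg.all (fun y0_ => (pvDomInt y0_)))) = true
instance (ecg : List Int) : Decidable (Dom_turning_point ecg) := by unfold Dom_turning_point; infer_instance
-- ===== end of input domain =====

-- B replaces A's inline three-point comparison by a two-phase scan: a trend table
-- of adjacent-pair comparison signs, then a pass over consecutive trend entries (alternative decomposition, same cost).


-- ===== PORT A =====
-- state is (turning_points_dir, turning_points); each append is ++ [·]
def turning_point (ecg : List Int) : List Int × List Int :=
  (PySem.List.pyRange 1 ((ecg.length : Int) - 1) 1).foldl
    (fun (s : List Int × List Int) i =>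
      if PySem.List.pyGetD ecg i 0 > PySem.List.pyGetD ecg (i - 1) 0 ∧
         PySem.List.pyGetD ecg i 0 > PySem.List.pyGetD ecg (i + 1) 0 then
        (s.1 ++ [1], s.2 ++ [i])
      else if PySem.List.pyGetD ecg i 0 < PySem.List.pyGetD ecg (i - 1) 0 ∧
              PySem.List.pyGetD ecg i 0 < PySem.List.pyGetD ecg (i + 1) 0 then
        (s.1 ++ [-1], s.2 ++ [i])
      else s)
    ([], [])

-- ===== PORT B =====
def turning_point_alt (ecg : List Int) : List Int × List Int :=
  let trend : List Int :=
    (PySem.List.pyRange 0 ((ecg.length : Int) - 1) 1).map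
      (fun j =>
        if PySem.List.pyGetD ecg (j + 1) 0 > PySem.List.pyGetD ecg j 0 then (1 : Int)
        else if PySem.List.pyGetD ecg (j + 1) 0 < PySem.List.pyGetD ecg j 0 then -1
        else 0)
  (PySem.List.pyRange 1 ((ecg.length : Int) - 1) 1).foldl
    (fun (s : List Int × List Int) i =>
      if PySem.List.pyGetD trend (i - 1) 0 = 1 ∧ PySem.List.pyGetD trend i 0 = -1 then
        (s.1 ++ [1], s.2 ++ [i])
      else if PySem.List.pyGetD trend (i - 1) 0 = -1 ∧ PySem.List.pyGetD trend i 0 = 1 then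
        (s.1 ++ [-1], s.2 ++ [i])
      else s)
    ([], [])

-- ===== PRECONDITION & SPEC =====
def Spec_turning_point (ecg : List Int) (out : List Int × List Int) : Prop := out = turning_point_alt ecg
instance (ecg : List Int) (out : List Int × List Int) : Decidable (Spec_turning_point ecg out) := by unfold Spec_turning_point; infer_instance

-- ===== CLAIM (what is proved, stated in full; the proofs are below) =====
def Claim_equal_turning_point : Prop := ∀ (ecg : List Int), Dom_turning_point ecg → Spec_turning_point ecg (turning_point ecg)

-- ===== LEMMAS AND PROOFS =====

theorem trend_eval (ecg : List Int) (i : Int) (h0 : 0 ≤ i) (h1 : i < (ecg.length : Int) - 1) :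
    PySem.List.pyGetD
      ((PySem.List.pyRange 0 ((ecg.length : Int) - 1) 1).map
        (fun j =>
          if PySem.List.pyGetD ecg (j + 1) 0 > PySem.List.pyGetD ecg j 0 then (1 : Int)
          else if PySem.List.pyGetD ecg (j + 1) 0 < PySem.List.pyGetD ecg j 0 then -1
          else 0)) i 0
    = (if PySem.List.pyGetD ecg (i + 1) 0 > PySem.List.pyGetD ecg i 0 then (1 : Int)
       else if PySem.List.pyGetD ecg (i + 1) 0 < PySem.List.pyGetD ecg i 0 then -1
       else 0) :=
  PySem.List.pyGetD_map_pyRange_of_nonneg _ _ _ _ h0 h1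

-- ===== VERDICT (by name: the statement is the Claim_ definition above) =====
theorem turning_point_spec : Claim_equal_turning_point := by
  intro ecg _
  unfold Spec_turning_point turning_point turning_point_alt
  apply Eq.symm
  apply PySem.List.foldl_congr_mem
  intro s i hi
  rw [PySem.List.mem_pyRange_one] at hi
  rw [trend_eval ecg (i - 1) (by omega) (by omega), trend_eval ecg i (by omega) hi.2]
  have h1 : i - 1 + 1 = i := by omega
  rw [h1]
  split_ifs <;> simp_all <;> omega
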